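-- pv_equiv track=rewrite | github.com/jfievet/ccsds_ldpc | c/qc_encoder_12_1024/generate_constants.py | bits_to_words
-- ===== SOURCE A (Python) =====
-- def bits_to_words(bits: list[int]) -> tuple[int, int]:
--     low = 0
--     high = 0
--     for index, bit in enumerate(bits):
--         if bit:
--             if index < 64:
--                 low |= 1 << index
--             else:
--                 high |= 1 << (index - 64)
--     return low, high
-- ===== SOURCE B (Python) =====
-- def bits_to_words(bits: list[int]) -> tuple[int, int]:
--     total = sum(1 << i for i, b in enumerate(bits) if b)
--     return total & ((1 << 64) - 1), total >> 64
-- ===== Notes on version B (the rewrite author's own statement) =====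
-- stated objective: idiomatic
-- what changed: B accumulates all set bits into a single integer with sum(1 << i ...) and then splits it arithmetically into the low 64-bit word (mask) and the unbounded high word (shift), instead of A's loop that or-s each bit into one of two accumulators chosen by an index comparison.
import Mathlib
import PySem

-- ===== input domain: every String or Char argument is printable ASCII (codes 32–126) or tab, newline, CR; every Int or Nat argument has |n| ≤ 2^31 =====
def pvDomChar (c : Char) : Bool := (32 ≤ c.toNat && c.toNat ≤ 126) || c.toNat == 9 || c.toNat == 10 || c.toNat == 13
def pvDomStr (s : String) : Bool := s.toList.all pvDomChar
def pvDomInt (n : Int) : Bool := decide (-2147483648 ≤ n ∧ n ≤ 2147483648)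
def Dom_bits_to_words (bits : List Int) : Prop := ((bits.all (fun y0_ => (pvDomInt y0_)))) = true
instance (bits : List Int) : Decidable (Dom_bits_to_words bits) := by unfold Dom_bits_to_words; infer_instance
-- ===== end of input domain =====

-- B replaces A's two or-accumulators chosen by an index test with one summed integer
-- that is split arithmetically into low (mask) and high (shift); same cost, more idiomatic.

-- ===== PORT A =====
-- the `for index, bit in enumerate(bits)` loop: state (low, high), index carried as Nat
def pvLoopA : List Int → Nat → Int → Int → Int × Int
  | [], _, low, high => (low, high)
  | b :: rest, i, low, high =>
    if b ≠ 0 then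
      if i < 64 then pvLoopA rest (i + 1) (PySem.Int.bor low ((1 : Int) <<< i)) high
      else pvLoopA rest (i + 1) low (PySem.Int.bor high ((1 : Int) <<< (i - 64)))
    else pvLoopA rest (i + 1) low high

def bits_to_words (bits : List Int) : Int × Int := pvLoopA bits 0 0 0

-- ===== PORT B =====
-- `sum(1 << i for i, b in enumerate(bits) if b)`
def pvSumB : List Int → Nat → Int
  | [], _ => 0
  | b :: rest, i => (if b ≠ 0 then (1 : Int) <<< i else 0) + pvSumB rest (i + 1)

-- `return total & ((1 << 64) - 1), total >> 64`
def pvSplitB (total : Int) : Int × Int :=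
  (PySem.Int.band total (((1 : Int) <<< (64 : Nat)) - 1), total >>> (64 : Nat))

def bits_to_words_alt (bits : List Int) : Int × Int :=
  pvSplitB (pvSumB bits 0)

-- ===== PRECONDITION & SPEC =====
def Spec_bits_to_words (bits : List Int) (out : Int × Int) : Prop := out = bits_to_words_alt bits
instance (bits : List Int) (out : Int × Int) : Decidable (Spec_bits_to_words bits out) := by unfold Spec_bits_to_words; infer_instance

-- ===== CLAIM (what is proved, stated in full; the proofs are below) =====
def Claim_equal_bits_to_words : Prop := ∀ (bits : List Int), Dom_bits_to_words bits → Spec_bits_to_words bits (bits_to_words bits)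

-- ===== LEMMAS AND PROOFS =====

-- Nat-level value of the bit sum
def pvS : List Int → Nat → Nat
  | [], _ => 0
  | b :: rest, i => (if b ≠ 0 then 2 ^ i else 0) + pvS rest (i + 1)

theorem pvS_dvd : ∀ (bits : List Int) (i : Nat), 2 ^ i ∣ pvS bits i := by
  intro bits
  induction bits with
  | nil => intro i; simp [pvS]
  | cons b rest ih =>
    intro i
    have h2 : (2 : Nat) ^ i ∣ pvS rest (i + 1) := (pow_dvd_pow 2 (Nat.le_succ i)).trans (ih (i + 1))
    by_cases hb : b ≠ 0
    · simpa [pvS, hb] using Dvd.dvd.add (dvd_refl ((2:Nat) ^ i)) h2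
    · simpa [pvS, hb] using h2

theorem one_shiftLeft_int (i : Nat) : (1 : Int) <<< i = Int.ofNat (2 ^ i) := by
  simp [Int.shiftLeft_eq]

theorem pvSumB_eq (bits : List Int) : ∀ (i : Nat), pvSumB bits i = Int.ofNat (pvS bits i) := by
  induction bits with
  | nil => intro i; simp [pvSumB, pvS]
  | cons b rest ih =>
    intro i
    by_cases hb : b ≠ 0 <;> simp [pvSumB, pvS, hb, ih (i + 1), one_shiftLeft_int]

theorem lor_two_pow_eq_add {l i : Nat} (h : l < 2 ^ i) : l ||| 2 ^ i = l + 2 ^ i := by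
  have h1 : 1 <<< i + l = 1 <<< i ||| l := Nat.shiftLeft_add_eq_or_of_lt h 1
  rw [Nat.one_shiftLeft] at h1
  rw [Nat.lor_comm, ← h1]
  omega

theorem bor_cast (l : Nat) (e : Nat) (h : l < 2 ^ e) :
    PySem.Int.bor (Int.ofNat l) ((1 : Int) <<< e) = Int.ofNat (l + 2 ^ e) := by
  rw [one_shiftLeft_int]
  have : PySem.Int.bor (Int.ofNat l) (Int.ofNat (2 ^ e)) = Int.ofNat (l ||| 2 ^ e) := by
    simp [PySem.Int.bor]
    congr 1
  rw [this, lor_two_pow_eq_add h]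

-- residue split when the remaining sum is divisible by 2^(i+1), i < 64
theorem mod_div_split_low (i Sx : Nat) (hi : i < 64) (hd : 2 ^ (i + 1) ∣ Sx) :
    (2 ^ i + Sx) % 2 ^ 64 = 2 ^ i + Sx % 2 ^ 64 ∧ (2 ^ i + Sx) / 2 ^ 64 = Sx / 2 ^ 64 := by
  have h64 : (2 : Nat) ^ (i + 1) ∣ 2 ^ 64 := pow_dvd_pow 2 (by omega)
  have hdr : 2 ^ (i + 1) ∣ Sx % 2 ^ 64 := (Nat.dvd_mod_iff h64).mpr hd
  obtain ⟨m, hm⟩ := hdr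
  have hrlt : Sx % 2 ^ 64 < 2 ^ 64 := Nat.mod_lt _ (by positivity)
  have hK : (2 : Nat) ^ 64 = 2 ^ (i + 1) * 2 ^ (63 - i) := by
    rw [← pow_add]; congr 1; omega
  have hmlt : m < 2 ^ (63 - i) := by
    by_contra hc
    push_neg at hc
    have : 2 ^ (i + 1) * 2 ^ (63 - i) ≤ 2 ^ (i + 1) * m := Nat.mul_le_mul_left _ hc
    omega
  have hsmall : 2 ^ i + Sx % 2 ^ 64 < 2 ^ 64 := by
    have hstep : 2 ^ (i + 1) * m + 2 ^ (i + 1) ≤ 2 ^ 64 := by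
      calc 2 ^ (i + 1) * m + 2 ^ (i + 1) = 2 ^ (i + 1) * (m + 1) := by ring
        _ ≤ 2 ^ (i + 1) * 2 ^ (63 - i) := Nat.mul_le_mul_left _ hmlt
        _ = 2 ^ 64 := hK.symm
    have hp : (2 : Nat) ^ (i + 1) = 2 ^ i + 2 ^ i := by rw [pow_succ]; omega
    have h1 : 1 ≤ (2 : Nat) ^ i := Nat.one_le_two_pow
    omega
  have hq := Nat.div_add_mod Sx (2 ^ 64)
  set q := Sx / 2 ^ 64 with hqdef
  set r := Sx % 2 ^ 64 with hrdef
  constructor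
  · have : 2 ^ i + Sx = 2 ^ i + r + 2 ^ 64 * q := by omega
    rw [this, Nat.add_mul_mod_self_left, Nat.mod_eq_of_lt hsmall]
  · have : 2 ^ i + Sx = 2 ^ i + r + 2 ^ 64 * q := by omega
    rw [this, Nat.add_mul_div_left _ _ (by positivity), Nat.div_eq_of_lt hsmall]
    omega

theorem mod_div_split_high (i Sx : Nat) (hi : 64 ≤ i) (hd : 2 ^ (i + 1) ∣ Sx) :
    (2 ^ i + Sx) % 2 ^ 64 = 0 ∧ (2 ^ i + Sx) / 2 ^ 64 = 2 ^ (i - 64) + Sx / 2 ^ 64 := by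
  have h64 : (2 : Nat) ^ 64 ∣ 2 ^ (i + 1) := pow_dvd_pow 2 (by omega)
  obtain ⟨s, hs⟩ := h64.trans hd
  have hip : (2 : Nat) ^ i = 2 ^ 64 * 2 ^ (i - 64) := by
    rw [← pow_add]; congr 1; omega
  have hsum : 2 ^ i + Sx = 2 ^ 64 * (2 ^ (i - 64) + s) := by rw [hip, hs]; ring
  constructor
  · rw [hsum]; exact Nat.mul_mod_right _ _
  · rw [hsum, hs, Nat.mul_div_cancel_left _ (by positivity : (0:Nat) < 2 ^ 64),
        Nat.mul_div_cancel_left _ (by positivity : (0:Nat) < 2 ^ 64)]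

theorem pvLoopA_inv : ∀ (bits : List Int) (i l h : Nat),
    (i < 64 → l < 2 ^ i ∧ h = 0) → (64 ≤ i → l < 2 ^ 64 ∧ h < 2 ^ (i - 64)) →
    pvLoopA bits i (Int.ofNat l) (Int.ofNat h) =
      (Int.ofNat (l + pvS bits i % 2 ^ 64), Int.ofNat (h + pvS bits i / 2 ^ 64)) := by
  intro bits
  induction bits with
  | nil => intro i l h _ _; simp [pvLoopA, pvS]
  | cons b rest ih =>
    intro i l h hlow hhigh
    have hdvd := pvS_dvd rest (i + 1)
    by_cases hb : b ≠ 0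
    · by_cases hi : i < 64
      · obtain ⟨hl, hh⟩ := hlow hi
        have hsplit := mod_div_split_low i (pvS rest (i + 1)) hi hdvd
        rw [show pvLoopA (b :: rest) i (Int.ofNat l) (Int.ofNat h) =
              pvLoopA rest (i + 1) (PySem.Int.bor (Int.ofNat l) ((1 : Int) <<< i)) (Int.ofNat h)
            by simp [pvLoopA, hb, hi]]
        rw [bor_cast l i hl]
        rw [ih (i + 1) (l + 2 ^ i) h
          (by intro h64
              refine ⟨?_, hh⟩
              have : (2:Nat) ^ (i+1) = 2 ^ i + 2 ^ i := by rw [pow_succ]; omega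
              omega)
          (by intro h64
              have hieq : i = 63 := by omega
              subst hieq
              refine ⟨by norm_num at hl ⊢; omega, ?_⟩
              simp [hh])]
        have hS : pvS (b :: rest) i = 2 ^ i + pvS rest (i + 1) := by simp [pvS, hb]
        rw [hS, hsplit.1, hsplit.2]
        simp only [Prod.mk.injEq]
        constructor <;> first | trivial | (congr 1; omega)
      · push_neg at hi
        obtain ⟨hl, hh⟩ := hhigh hi
        have hsplit := mod_div_split_high i (pvS rest (i + 1)) hi hdvd
        rw [show pvLoopA (b :: rest) i (Int.ofNat l) (Int.ofNat h) =
              pvLoopA rest (i + 1) (Int.ofNat l) (PySem.Int.bor (Int.ofNat h) ((1 : Int) <<< (i - 64)))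
            by simp [pvLoopA, hb, hi]]
        rw [bor_cast h (i - 64) hh]
        rw [ih (i + 1) l (h + 2 ^ (i - 64))
          (by omega)
          (by intro _
              refine ⟨hl, ?_⟩
              have h1 : i + 1 - 64 = (i - 64) + 1 := by omega
              have : (2:Nat) ^ ((i - 64) + 1) = 2 ^ (i - 64) + 2 ^ (i - 64) := by rw [pow_succ]; omega
              rw [h1]; omega)]
        have hS : pvS (b :: rest) i = 2 ^ i + pvS rest (i + 1) := by simp [pvS, hb]
        have hz : pvS rest (i + 1) % 2 ^ 64 = 0 := by
          obtain ⟨k, hk⟩ := (pow_dvd_pow 2 (by omega : 64 ≤ i + 1)).trans hdvd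
          rw [hk, Nat.mul_mod_right]
        rw [hS, hsplit.1, hsplit.2, hz]
        simp only [Prod.mk.injEq]
        constructor <;> first | trivial | (congr 1; omega)
    · rw [show pvLoopA (b :: rest) i (Int.ofNat l) (Int.ofNat h) =
            pvLoopA rest (i + 1) (Int.ofNat l) (Int.ofNat h)
          by simp [pvLoopA, hb]]
      rw [ih (i + 1) l h
        (by intro h64
            obtain ⟨hl, hh⟩ := hlow (by omega)
            exact ⟨lt_trans hl (by exact Nat.pow_lt_pow_right (by omega) (by omega)), hh⟩)
        (by intro h64
            by_cases hi : i < 64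
            · have hieq : i = 63 := by omega
              subst hieq
              obtain ⟨hl, hh⟩ := hlow (by omega)
              refine ⟨lt_trans hl (by norm_num), ?_⟩
              simp [hh]
            · obtain ⟨hl, hh⟩ := hhigh (by omega)
              refine ⟨hl, lt_of_lt_of_le hh ?_⟩
              exact Nat.pow_le_pow_right (by omega) (by omega))]
      have hS : pvS (b :: rest) i = pvS rest (i + 1) := by simp [pvS, hb]
      rw [hS]

theorem band_mask_cast (T : Nat) :
    PySem.Int.band (Int.ofNat T) (((1 : Int) <<< (64 : Nat)) - 1) = Int.ofNat (T % 2 ^ 64) := by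
  have h1 : ((1 : Int) <<< (64 : Nat)) - 1 = Int.ofNat (2 ^ 64 - 1) := by
    rw [one_shiftLeft_int]
    norm_num
  rw [h1]
  have h2 : PySem.Int.band (Int.ofNat T) (Int.ofNat (2 ^ 64 - 1)) = Int.ofNat (T &&& (2 ^ 64 - 1)) := by
    simp [PySem.Int.band]
  rw [h2, Nat.and_two_pow_sub_one_eq_mod T 64]

theorem shiftRight_cast (T : Nat) : (Int.ofNat T) >>> (64 : Nat) = Int.ofNat (T / 2 ^ 64) := by
  have : (Int.ofNat T) >>> (64 : Nat) = Int.ofNat (T >>> 64) := rfl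
  rw [this, Nat.shiftRight_eq_div_pow]

-- ===== VERDICT (by name: the statement is the Claim_ definition above) =====
theorem bits_to_words_spec : Claim_equal_bits_to_words := by
  intro bits _
  unfold Spec_bits_to_words bits_to_words bits_to_words_alt pvSplitB
  rw [pvSumB_eq bits 0, band_mask_cast, shiftRight_cast]
  have h := pvLoopA_inv bits 0 0 0 (by intro _; exact ⟨by norm_num, rfl⟩) (by omega)
  simpa using h
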